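-- pv_equiv track=rewrite | github.com/Jongminfire/Programmers | Python/Level 2/영어 끝말잇기 (구현) .py | solution
-- ===== SOURCE A (Python) =====
-- def solution(n, words):
--     answer = [0,0]
--     prev = words[0]
--     # 검색을 빠르게 하기 위해 dictionary 사용
--     word = {words[0]:1}
--
--     for i in range(1,len(words)):
--         if words[i][0] != prev[-1] or words[i] in word :
--             answer = [i%n+1,i//n+1]
--             break
--         else:
--             prev = words[i]
--             word[words[i]]=1
--
--     return answer
-- ===== SOURCE B (Python) =====
-- def solution(n, words):
--     # first repeated word (first-occurrence seen-set pass)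
--     dup_idx = None
--     seen = set()
--     for i, w in enumerate(words):
--         if w in seen:
--             dup_idx = i
--             break
--         seen.add(w)
--     hi = dup_idx if dup_idx is not None else len(words)
--     # first chain break strictly before the duplicate (a later break cannot win)
--     break_idx = next((i for i in range(1, hi)
--                       if words[i][0] != words[i - 1][-1]), None)
--     idx = break_idx if break_idx is not None else dup_idx
--     if idx is None:
--         return [0, 0]
--     return [idx % n + 1, idx // n + 1]
-- ===== Notes on version B (the rewrite author's own statement) =====
-- stated objective: alternative
-- what changed: Replaces A's single interleaved short-circuit loop (carrying prev and a dict) with two separate passes: a seen-set pass finding the first repeated word, then an index scan for the first chain break strictly before it, preferring the earlier break.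
import Mathlib
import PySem

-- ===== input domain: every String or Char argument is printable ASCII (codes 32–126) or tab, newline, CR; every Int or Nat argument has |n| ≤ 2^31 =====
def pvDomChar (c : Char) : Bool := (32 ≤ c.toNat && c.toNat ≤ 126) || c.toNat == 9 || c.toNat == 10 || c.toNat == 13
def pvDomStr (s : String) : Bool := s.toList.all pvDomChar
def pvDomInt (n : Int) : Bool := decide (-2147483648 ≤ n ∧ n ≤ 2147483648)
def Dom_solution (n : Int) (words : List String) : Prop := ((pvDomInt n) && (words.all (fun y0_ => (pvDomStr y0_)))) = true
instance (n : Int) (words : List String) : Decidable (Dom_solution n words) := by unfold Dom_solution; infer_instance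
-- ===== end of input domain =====

-- B replaces A's single interleaved short-circuit loop by two separate passes (first repeated
-- word via a seen-set, then first chain break strictly before it); equal return value on Pre_.

-- ===== PORT A =====
-- A's loop 'for i in range(1, len(words))' with early break, carrying prev and the dict
def solutionGo (n : Int) (words : List String) (prev : String)
    (dict : PySem.Dict String Int) (i : Nat) : List Int :=
  if h : i < words.length then
    if PySem.Str.pyGet? words[i] 0 ≠ PySem.Str.pyGet? prev (-1) ∨ dict.contains words[i] = true then
      [PySem.Int.mod (i : Int) n + 1, PySem.Int.floordiv (i : Int) n + 1]
    else
      solutionGo n words words[i] (dict.insert words[i] 1) (i + 1)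
  else [0, 0]
termination_by words.length - i

def solution (n : Int) (words : List String) : List Int :=
  match words with
  | [] => []   -- Python: 'words[0]' raises IndexError here (excluded by Pre_)
  | w0 :: _ => solutionGo n words w0 (PySem.Dict.insert PySem.Dict.empty w0 1) 1

-- ===== PORT B =====
-- Source B's enumerate loop accumulating the seen-set: first index whose word was already used
def findDup (seen : PySem.Set String) (i : Nat) : List String → Option Nat
  | [] => none
  | w :: rest =>
    if PySem.Set.contains seen w then some i
    else findDup (PySem.Set.add seen w) (i + 1) rest

-- Source B's next((i for i in range(1, hi) if words[i][0] != words[i-1][-1]), None)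
def findBreakUpto (words : List String) (hi : Nat) (i : Nat) : Option Nat :=
  if _ : i < hi then
    if PySem.Str.pyGet? (words.getD i "") 0 ≠ PySem.Str.pyGet? (words.getD (i - 1) "") (-1)
    then some i
    else findBreakUpto words hi (i + 1)
  else none
termination_by hi - i

def solution_alt (n : Int) (words : List String) : List Int :=
  let dupIdx := findDup PySem.Set.empty 0 words
  let hi := dupIdx.getD words.length
  match (findBreakUpto words hi 1).orElse (fun _ => dupIdx) with
  | none => [0, 0]
  | some idx => [PySem.Int.mod (idx : Int) n + 1, PySem.Int.floordiv (idx : Int) n + 1]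

-- ===== PRECONDITION & SPEC =====
-- chain break at k (both words nonempty, first char ≠ previous word's last char)
def breakAt (words : List String) (k : Nat) : Bool :=
  decide (1 ≤ k) && decide (k < words.length) && (words.getD k "" != "") &&
    (words.getD (k - 1) "" != "") &&
    decide (PySem.Str.pyGet? (words.getD k "") 0 ≠ PySem.Str.pyGet? (words.getD (k - 1) "") (-1))

-- failure at k: chain break or duplicate of an earlier word
def failAt (words : List String) (k : Nat) : Bool :=
  breakAt words k ||
    (decide (1 ≤ k) && decide (k < words.length) && (words.getD k "" != "") &&
      (words.getD (k - 1) "" != "") && (words.take k).contains (words.getD k ""))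

-- Pre_ excludes exactly the inputs where A raises: the empty word list (IndexError on
-- words[0]), lists where an empty-string word is reached with no failure (break or
-- duplicate) before it (IndexError on ''[0]/''[-1]), and n = 0 when a failure index
-- exists (ZeroDivisionError in i % n).
def Pre_solution (n : Int) (words : List String) : Prop :=
  words ≠ [] ∧
  (∀ j ∈ List.range words.length,
    (words.getD j "" = "" ∨ words.getD (j - 1) "" = "") → 1 ≤ j →
      ∃ k ∈ List.range j, failAt words k = true) ∧
  (n ≠ 0 ∨ ∀ k ∈ List.range words.length, failAt words k = false)
instance (n : Int) (words : List String) : Decidable (Pre_solution n words) := by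
  unfold Pre_solution; infer_instance

def pvWitness_solution : Int × List String := (2, ["ab", "bc", "ca"])

def Spec_solution (n : Int) (words : List String) (out : List Int) : Prop := out = solution_alt n words
instance (n : Int) (words : List String) (out : List Int) : Decidable (Spec_solution n words out) := by unfold Spec_solution; infer_instance

-- ===== CLAIM (what is proved, stated in full; the proofs are below) =====
def Claim_equal_solution : Prop := ∀ (n : Int) (words : List String), Dom_solution n words → Pre_solution n words → Spec_solution n words (solution n words)

-- ===== LEMMAS AND PROOFS =====

lemma findDup_ge {seen : PySem.Set String} {i j : Nat} {l : List String}
    (h : findDup seen i l = some j) : i ≤ j := by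
  induction l generalizing seen i with
  | nil => cases h
  | cons w rest ih =>
      rw [findDup] at h
      split at h
      · simp only [Option.some.injEq] at h; omega
      · exact Nat.le_of_succ_le (ih h)

-- A's interleaved loop equals B's combination of the two scans, given the state invariants.
lemma go_eq (n : Int) (words : List String) :
    ∀ k i, words.length - i = k → 1 ≤ i →
    ∀ (prev : String) (dict : PySem.Dict String Int) (seen : PySem.Set String),
    (∀ h : i - 1 < words.length, prev = words[i-1]) →
    (∀ w, dict.contains w = true ↔ w ∈ words.take i) →
    (∀ w, PySem.Set.contains seen w = true ↔ w ∈ words.take i) →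
    solutionGo n words prev dict i =
      (let d := findDup seen i (words.drop i)
       match (findBreakUpto words (d.getD words.length) i).orElse (fun _ => d) with
       | none => [0, 0]
       | some idx => [PySem.Int.mod (idx : Int) n + 1, PySem.Int.floordiv (idx : Int) n + 1]) := by
  intro k
  induction k with
  | zero =>
      intro i hk hi prev dict seen hprev hdict hseen
      have hge : words.length ≤ i := by omega
      rw [solutionGo, dif_neg (by omega), List.drop_eq_nil_of_le hge]
      simp only [findDup]
      rw [findBreakUpto, dif_neg (by simp only [Option.getD]; omega)]
      rfl
  | succ k ih =>
      intro i hk hi prev dict seen hprev hdict hseen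
      have hlt : i < words.length := by omega
      have hprev' : prev = words[i-1] := hprev (by omega)
      have hdrop : words.drop i = words[i] :: words.drop (i + 1) :=
        List.drop_eq_getElem_cons hlt
      have hgdi : words.getD i "" = words[i] := List.getD_eq_getElem words "" hlt
      have hgdp : words.getD (i - 1) "" = words[i-1] :=
        List.getD_eq_getElem words "" (by omega)
      rw [solutionGo, dif_pos hlt, hdrop]
      simp only [findDup]
      by_cases hd : PySem.Set.contains seen words[i]
      · -- duplicate at i: A's dict check fires (possibly together with a break), B's dup pass yields i
        rw [if_pos hd]
        have hdict' : dict.contains words[i] = true := (hdict _).mpr ((hseen _).mp hd)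
        rw [if_pos (Or.inr hdict')]
        simp only [Option.getD]
        rw [findBreakUpto, dif_neg (by omega)]
        rfl
      · rw [if_neg hd]
        have hhi : i < (findDup (PySem.Set.add seen words[i]) (i + 1)
            (words.drop (i + 1))).getD words.length := by
          cases hfd : findDup (PySem.Set.add seen words[i]) (i + 1) (words.drop (i + 1)) with
          | none => simpa using hlt
          | some j => have := findDup_ge hfd; simpa using (by omega : i < j)
        rw [findBreakUpto, dif_pos hhi, hgdi, hgdp, ← hprev']
        by_cases hb : PySem.Str.pyGet? words[i] 0 ≠ PySem.Str.pyGet? prev (-1)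
        · -- chain break at i: both return index i
          rw [if_pos (Or.inl hb), if_pos hb]; rfl
        · -- no failure at i: both sides advance to i + 1
          have hdict0 : ¬ dict.contains words[i] = true := fun h =>
            hd ((hseen _).mpr ((hdict _).mp h))
          rw [if_neg (by tauto), if_neg hb]
          have htake : words.take (i + 1) = words.take i ++ [words[i]] :=
            List.take_succ_eq_append_getElem hlt
          have hrec := ih (i + 1) (by omega) (by omega) words[i]
            (dict.insert words[i] 1) (PySem.Set.add seen words[i])
            (fun h => by simp)
            (fun w => by
              simp only [PySem.Dict.contains_eq_decide_mem_keys, PySem.Dict.mem_keys_insert,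
                htake, List.mem_append, List.mem_singleton, decide_eq_true_eq]
              have := hdict w
              simp only [PySem.Dict.contains_eq_decide_mem_keys, decide_eq_true_eq] at this
              tauto)
            (fun w => by
              simp only [PySem.Set.contains_eq_listContains, List.contains_eq_mem,
                PySem.Set.mem_add, htake, List.mem_append, List.mem_singleton,
                decide_eq_true_eq]
              have := hseen w
              simp only [PySem.Set.contains_eq_listContains, List.contains_eq_mem,
                decide_eq_true_eq] at this
              tauto)
          simpa using hrec

-- ===== VERDICT (by name: the statement is the Claim_ definition above) =====
theorem solution_spec : Claim_equal_solution := by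
  intro n words _ hpre
  unfold Spec_solution
  obtain ⟨hne, -, -⟩ := hpre
  match words with
  | [] => exact absurd rfl hne
  | w0 :: rest =>
      show solutionGo n (w0 :: rest) w0 (PySem.Dict.insert PySem.Dict.empty w0 1) 1 =
        solution_alt n (w0 :: rest)
      unfold solution_alt
      have hdup0 : findDup PySem.Set.empty 0 (w0 :: rest) =
          findDup (PySem.Set.add PySem.Set.empty w0) 1 rest := by
        rw [findDup, if_neg (by simp [PySem.Set.contains_eq_listContains, PySem.Set.empty])]
      rw [hdup0]
      have := go_eq n (w0 :: rest) ((w0 :: rest).length - 1) 1 rfl (by omega) w0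
        (PySem.Dict.insert PySem.Dict.empty w0 1) (PySem.Set.add PySem.Set.empty w0)
        (fun h => rfl)
        (fun w => by
          simp [PySem.Dict.contains_eq_decide_mem_keys, PySem.Dict.mem_keys_insert,
            PySem.Dict.empty, eq_comm])
        (fun w => by
          simp [PySem.Set.contains_eq_listContains, PySem.Set.empty, eq_comm])
      simpa using this
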